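-- pv_equiv track=rewrite | github.com/daniel-reich/ubiquitous-fiesta | Bb9hTXYuvqx3aCm8d_2.py | alpha_clash
-- ===== SOURCE A (Python) =====
-- def alpha_clash(stringA, ind_A, str_Z, ind_Z):
--     str_Z = [x for i,x in enumerate(str_Z) if i not in ind_A]
--     stringA = [x for i,x in enumerate(stringA) if i not in ind_Z]
--     a = {'A': 0, 'Z': 0}
--     for x, y in zip(stringA, str_Z):
--         if ord(x) > ord(y):
--             a['A'] += ord(x) - ord(y)
--         elif ord(y) > ord(x):
--             a['Z'] += ord(y) - ord(x)
--     return a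
-- ===== SOURCE B (Python) =====
-- def alpha_clash(stringA, ind_A, str_Z, ind_Z):
--     # Single fused scan with two cursors over the ORIGINAL strings,
--     # skipping excluded indices on the fly: no intermediate filtered
--     # lists and no zip are ever built.
--     a = z = 0
--     i = j = 0
--     nA, nZ = len(stringA), len(str_Z)
--     while True:
--         while i < nA and i in ind_Z:
--             i += 1
--         while j < nZ and j in ind_A:
--             j += 1
--         if i >= nA or j >= nZ:
--             break
--         d = ord(stringA[i]) - ord(str_Z[j])
--         if d > 0:
--             a += d
--         elif d < 0:
--             z += -d
--         i += 1
--         j += 1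
--     return {'A': a, 'Z': z}
-- ===== Notes on version B (the rewrite author's own statement) =====
-- stated objective: alternative
-- what changed: Replaces A's filter-both-strings-then-zip-then-dict-accumulate pipeline by one fused two-cursor scan of the original strings that skips excluded indices on the fly and keeps the two scores in plain accumulators, never materializing the filtered lists or the zip.
import Mathlib
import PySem

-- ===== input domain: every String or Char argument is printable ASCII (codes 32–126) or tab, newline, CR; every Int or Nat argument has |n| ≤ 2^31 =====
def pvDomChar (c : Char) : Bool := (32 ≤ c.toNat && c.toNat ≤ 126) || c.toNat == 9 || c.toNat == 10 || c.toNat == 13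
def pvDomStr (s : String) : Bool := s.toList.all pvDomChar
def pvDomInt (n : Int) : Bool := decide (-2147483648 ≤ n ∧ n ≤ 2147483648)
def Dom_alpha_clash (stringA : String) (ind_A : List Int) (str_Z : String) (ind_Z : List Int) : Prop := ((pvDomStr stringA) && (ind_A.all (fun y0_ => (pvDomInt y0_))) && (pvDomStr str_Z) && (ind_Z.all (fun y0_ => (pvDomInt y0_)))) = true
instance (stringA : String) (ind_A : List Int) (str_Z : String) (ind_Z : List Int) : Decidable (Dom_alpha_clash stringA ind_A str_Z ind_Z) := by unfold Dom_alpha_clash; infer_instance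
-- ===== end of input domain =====

-- B replaces A's filter-then-zip-then-dict-accumulate pipeline by one fused two-cursor
-- scan of the original strings that skips excluded indices on the fly (objective: alternative).

-- ===== PORT A =====
def alpha_clash (stringA : String) (ind_A : List Int) (str_Z : String) (ind_Z : List Int) : List (String × Int) :=
  -- str_Z = [x for i,x in enumerate(str_Z) if i not in ind_A]
  let fz := ((PySem.List.enumerate str_Z.toList 0).filter (fun p => !decide (p.1 ∈ ind_A))).map (·.2)
  -- stringA = [x for i,x in enumerate(stringA) if i not in ind_Z]
  let fa := ((PySem.List.enumerate stringA.toList 0).filter (fun p => !decide (p.1 ∈ ind_Z))).map (·.2)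
  -- a = {'A': 0, 'Z': 0}; for x, y in zip(stringA, str_Z): if/elif …
  let d := (fa.zip fz).foldl (fun d xy =>
      if (xy.1.toNat : Int) > (xy.2.toNat : Int) then
        d.modify "A" 0 (· + ((xy.1.toNat : Int) - (xy.2.toNat : Int)))
      else if (xy.2.toNat : Int) > (xy.1.toNat : Int) then
        d.modify "Z" 0 (· + ((xy.2.toNat : Int) - (xy.1.toNat : Int)))
      else d)
    (PySem.Dict.ofList [("A", (0 : Int)), ("Z", (0 : Int))])
  d.items

-- ===== PORT B =====
-- `while i < n and i in excl: i += 1` over the enumerated tail: drop leading excluded entries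
def clashSkip (excl : List Int) : List (Int × Char) → List (Int × Char)
  | [] => []
  | p :: ps => if p.1 ∈ excl then clashSkip excl ps else p :: ps

-- the fused `while True` loop: two cursors, skip excluded, compare, accumulate
def clashGo (indZ indA : List Int) : List (Int × Char) → List (Int × Char) → Int → Int → Int × Int
  | [], _, a, z => (a, z)
  | p :: xs, ys, a, z =>
    if p.1 ∈ indZ then clashGo indZ indA xs ys a z
    else
      match clashSkip indA ys with
      | [] => (a, z)
      | q :: ys' =>
        let d : Int := (p.2.toNat : Int) - (q.2.toNat : Int)
        if d > 0 then clashGo indZ indA xs ys' (a + d) z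
        else if d < 0 then clashGo indZ indA xs ys' a (z + (-d))
        else clashGo indZ indA xs ys' a z

def alpha_clash_alt (stringA : String) (ind_A : List Int) (str_Z : String) (ind_Z : List Int) : List (String × Int) :=
  let r := clashGo ind_Z ind_A (PySem.List.enumerate stringA.toList 0) (PySem.List.enumerate str_Z.toList 0) 0 0
  [("A", r.1), ("Z", r.2)]

-- ===== PRECONDITION & SPEC =====
def Spec_alpha_clash (stringA : String) (ind_A : List Int) (str_Z : String) (ind_Z : List Int) (out : List (String × Int)) : Prop := out = alpha_clash_alt stringA ind_A str_Z ind_Z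
instance (stringA : String) (ind_A : List Int) (str_Z : String) (ind_Z : List Int) (out : List (String × Int)) : Decidable (Spec_alpha_clash stringA ind_A str_Z ind_Z out) := by unfold Spec_alpha_clash; infer_instance

-- ===== CLAIM (what is proved, stated in full; the proofs are below) =====
def Claim_equal_alpha_clash : Prop := ∀ (stringA : String) (ind_A : List Int) (str_Z : String) (ind_Z : List Int), Dom_alpha_clash stringA ind_A str_Z ind_Z → Spec_alpha_clash stringA ind_A str_Z ind_Z (alpha_clash stringA ind_A str_Z ind_Z)

-- ===== LEMMAS AND PROOFS =====

-- A's loop over the zipped pairs, starting from any contents of the two keys,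
-- ends with exactly the two sign-split sums added to them.
theorem alpha_clash_loop (l : List (Char × Char)) (a z : Int) :
    (l.foldl (fun d xy =>
      if (xy.1.toNat : Int) > (xy.2.toNat : Int) then
        d.modify "A" 0 (· + ((xy.1.toNat : Int) - (xy.2.toNat : Int)))
      else if (xy.2.toNat : Int) > (xy.1.toNat : Int) then
        d.modify "Z" 0 (· + ((xy.2.toNat : Int) - (xy.1.toNat : Int)))
      else d)
      (PySem.Dict.mk [("A", a), ("Z", z)])).items
    = [("A", a + (((l.map (fun xy => ((xy.1.toNat : Int) - (xy.2.toNat : Int)))).filter (fun d => 0 < d)).sum)),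
       ("Z", z + ((((l.map (fun xy => ((xy.1.toNat : Int) - (xy.2.toNat : Int)))).filter (fun d => d < 0)).map (fun d => -d)).sum))] := by
  induction l generalizing a z with
  | nil => simp
  | cons xy l ih =>
    rcases xy with ⟨x, y⟩
    by_cases h1 : (x.toNat : Int) > (y.toNat : Int)
    · have hd : (PySem.Dict.mk [("A", a), ("Z", z)]).modify "A" 0
          (· + ((x.toNat : Int) - (y.toNat : Int)))
          = PySem.Dict.mk [("A", a + ((x.toNat : Int) - (y.toNat : Int))), ("Z", z)] := rfl
      simp only [List.foldl_cons, List.map_cons, List.filter_cons, if_pos h1, hd]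
      have hneg : ¬ ((x.toNat : Int) - (y.toNat : Int) < 0) := by omega
      have hn : y.toNat < x.toNat := by exact_mod_cast h1
      rw [ih]
      simp [hn, hneg, add_assoc]
    · by_cases h2 : (y.toNat : Int) > (x.toNat : Int)
      · have hd : (PySem.Dict.mk [("A", a), ("Z", z)]).modify "Z" 0
            (· + ((y.toNat : Int) - (x.toNat : Int)))
            = PySem.Dict.mk [("A", a), ("Z", z + ((y.toNat : Int) - (x.toNat : Int)))] := rfl
        simp only [List.foldl_cons, List.map_cons, List.filter_cons, if_neg h1, if_pos h2, hd]
        have hneg : ((x.toNat : Int) - (y.toNat : Int) < 0) := by omega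
        have hn : ¬ (y.toNat < x.toNat) := by omega
        rw [ih]
        simp [hn, hneg, add_assoc]
      · simp only [List.foldl_cons, List.map_cons, List.filter_cons, if_neg h1, if_neg h2]
        have hneg : ¬ ((x.toNat : Int) - (y.toNat : Int) < 0) := by omega
        have hn : ¬ (y.toNat < x.toNat) := by omega
        rw [ih]
        simp [hn, hneg]

-- skipping leading excluded entries does not change the filtered list
theorem clashSkip_filter (excl : List Int) (ys : List (Int × Char)) :
    (clashSkip excl ys).filter (fun p => !decide (p.1 ∈ excl))
      = ys.filter (fun p => !decide (p.1 ∈ excl)) := by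
  induction ys with
  | nil => rfl
  | cons q ys ih =>
    by_cases h : q.1 ∈ excl
    · simp [clashSkip, List.filter_cons, h, ih]
    · simp [clashSkip, h]

-- the head of a nonempty skip result is kept
theorem clashSkip_head (excl : List Int) (ys : List (Int × Char)) {q : Int × Char}
    {ys' : List (Int × Char)} (h : clashSkip excl ys = q :: ys') : q.1 ∉ excl := by
  induction ys with
  | nil => simp [clashSkip] at h
  | cons p ps ih =>
    by_cases hp : p.1 ∈ excl
    · exact ih (by simpa [clashSkip, hp] using h)
    · simp only [clashSkip, if_neg hp] at h
      cases h; exact hp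

-- B's fused scan computes exactly the two sign-split sums over the zip of the filtered lists
theorem clashGo_eq (indZ indA : List Int) (xs ys : List (Int × Char)) (a z : Int) :
    clashGo indZ indA xs ys a z =
      (a + (((((xs.filter (fun p => !decide (p.1 ∈ indZ))).map (·.2)).zip
               ((ys.filter (fun p => !decide (p.1 ∈ indA))).map (·.2))).map
               (fun xy => ((xy.1.toNat : Int) - (xy.2.toNat : Int)))).filter (fun d => 0 < d)).sum,
       z + ((((((xs.filter (fun p => !decide (p.1 ∈ indZ))).map (·.2)).zip
               ((ys.filter (fun p => !decide (p.1 ∈ indA))).map (·.2))).map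
               (fun xy => ((xy.1.toNat : Int) - (xy.2.toNat : Int)))).filter (fun d => d < 0)).map (fun d => -d)).sum) := by
  induction xs generalizing ys a z with
  | nil => simp [clashGo]
  | cons p xs ih =>
    by_cases hp : p.1 ∈ indZ
    · simpa [clashGo, List.filter_cons, hp] using ih ys a z
    · have hfil := clashSkip_filter indA ys
      cases hskip : clashSkip indA ys with
      | nil =>
        have hys : ys.filter (fun p => !decide (p.1 ∈ indA)) = [] := by
          rw [← hfil, hskip]; rfl
        simp [clashGo, hp, hskip, hys]
      | cons q ys' =>
        have hq : q.1 ∉ indA := clashSkip_head indA ys hskip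
        have hys : ys.filter (fun p => !decide (p.1 ∈ indA))
            = q :: ys'.filter (fun p => !decide (p.1 ∈ indA)) := by
          rw [← hfil, hskip, List.filter_cons]
          simp [hq]
        by_cases h1 : ((p.2.toNat : Int) - (q.2.toNat : Int)) > 0
        · have hneg : ¬ ((p.2.toNat : Int) - (q.2.toNat : Int) < 0) := by omega
          simp only [clashGo, hskip, if_neg hp, if_pos h1]
          rw [ih ys' (a + ((p.2.toNat : Int) - (q.2.toNat : Int))) z]
          have hn : q.2.toNat < p.2.toNat := by
            have := h1; omega
          simp [hys, List.filter_cons, hp, hn, hneg, add_assoc]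
        · by_cases h2 : ((p.2.toNat : Int) - (q.2.toNat : Int)) < 0
          · simp only [clashGo, hskip, if_neg hp, if_neg h1, if_pos h2]
            rw [ih ys' a (z + -((p.2.toNat : Int) - (q.2.toNat : Int)))]
            have hn : p.2.toNat < q.2.toNat := by
              have := h2; omega
            have hn' : ¬ q.2.toNat < p.2.toNat := by omega
            simp [hys, List.filter_cons, hp, hn, hn', h2, add_assoc]
          · simp only [clashGo, hskip, if_neg hp, if_neg h1, if_neg h2]
            rw [ih ys' a z]
            have hn : p.2.toNat = q.2.toNat := by
              have := h1; have := h2; omega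
            simp [hys, List.filter_cons, hp, hn, h1, h2]

-- ===== VERDICT (by name: the statement is the Claim_ definition above) =====
theorem alpha_clash_spec : Claim_equal_alpha_clash := by
  intro stringA ind_A str_Z ind_Z _
  show alpha_clash stringA ind_A str_Z ind_Z = alpha_clash_alt stringA ind_A str_Z ind_Z
  unfold alpha_clash alpha_clash_alt
  have h0 : PySem.Dict.ofList [("A", (0 : Int)), ("Z", (0 : Int))]
      = PySem.Dict.mk [("A", (0 : Int)), ("Z", (0 : Int))] := rfl
  rw [h0, alpha_clash_loop, clashGo_eq]
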